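-- pv_equiv track=rewrite | github.com/Kotaimen/stonemason | stonemason/provider/pyramid/serial.py | coord2dir
-- ===== SOURCE A (Python) =====
-- import math
--
-- def coord2dir(z, x, y):
--
--     """ Return a directory name list for a given tile coordinate
--
--     Groups adjacent m*m tiles in a sub directory to improve file system
--     performance.  Returns a list of directory names, to create a
--     directory str, use os.path.join(*list)
--     """
--
--     assert 0 <= z <= 31
--     dim = 2 ** z
--     assert 0 <= x < dim and 0 <= y < dim
--
--     # Group 4096 tiles
--     m = 64
--
--     zdiff = int(math.floor(math.log(m) / math.log(2)))
--
--     # layer has less than m*m tiles, just use z as pathname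
--     if z <= zdiff:
--         return ['%02d' % z, ]
--
--     # metatile number
--     mx, my = x // m, y // m
--     mz = z - zdiff
--     mn = 2 ** mz * my + mx
--
--     # calculate how many digits are needed
--     digits = len('%x' % (4 ** mz - 1))
--     if digits % 2 != 0:
--         digits += 1
--     hex_str = ('%%0%dX' % digits) % mn
--
--     # split hex string into 2 char tuple
--     dirs = list((hex_str[i:i + 2] for i in range(0, len(hex_str), 2)))
--     dirs.insert(0, '%02d' % z)
--
--     return dirs
-- ===== SOURCE B (Python) =====
-- def coord2dir(z, x, y):
--     """Arithmetic base-256 re-implementation: extract bytes of the metatile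
--     number with divmod instead of formatting a hex string and slicing it."""
--     assert 0 <= z <= 31
--     dim = 2 ** z
--     assert 0 <= x < dim and 0 <= y < dim
--
--     if z <= 6:
--         return ['%02d' % z]
--
--     mz = z - 6
--     mn = (y // 64) * 2 ** mz + x // 64
--
--     # number of bytes = half of A's (even-rounded) hex-digit count
--     nbytes = (mz + 3) // 4
--
--     parts = []
--     n = mn
--     for _ in range(nbytes):
--         n, b = divmod(n, 256)
--         parts.append('%02X' % b)
--     parts.append('%02d' % z)
--     parts.reverse()
--     return parts
-- ===== Notes on version B (the rewrite author's own statement) =====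
-- stated objective: alternative
-- what changed: B extracts the directory components arithmetically, peeling bytes off the metatile number with divmod(n, 256) and computing the byte count by a closed formula, instead of formatting the number as a zero-padded hex string and slicing it into 2-character pieces.
import Mathlib
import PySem

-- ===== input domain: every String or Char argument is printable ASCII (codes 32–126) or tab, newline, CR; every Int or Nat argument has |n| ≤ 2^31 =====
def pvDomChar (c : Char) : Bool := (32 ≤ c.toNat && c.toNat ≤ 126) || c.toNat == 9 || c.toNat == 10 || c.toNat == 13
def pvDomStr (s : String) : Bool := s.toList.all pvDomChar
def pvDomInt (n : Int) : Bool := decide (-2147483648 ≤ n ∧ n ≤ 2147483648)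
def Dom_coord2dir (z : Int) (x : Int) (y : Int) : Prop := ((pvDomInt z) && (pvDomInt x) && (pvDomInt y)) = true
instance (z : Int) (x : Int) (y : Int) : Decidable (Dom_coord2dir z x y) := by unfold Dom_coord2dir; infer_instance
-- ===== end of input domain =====

-- B replaces A's hex-string formatting and slicing by arithmetic base-256 byte extraction; equal output proved on all inputs A accepts.

-- shared formatting helpers ('%02d' and hex digits, exact on the values reached under Pre_)
def fmt02d (z : Int) : String :=
  let s := PySem.Int.toStr z
  if s.toList.length = 1 then "0" ++ s else s

def hexDigU (n : Nat) : Char := if n < 10 then Char.ofNat (48 + n) else Char.ofNat (55 + n)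
def hexDigL (n : Nat) : Char := if n < 10 then Char.ofNat (48 + n) else Char.ofNat (87 + n)

-- '%X' / '%x' of a nonnegative integer, most-significant digit first
def hexCharsU (n : Nat) : List Char :=
  if h : n < 16 then [hexDigU n] else hexCharsU (n / 16) ++ [hexDigU (n % 16)]
decreasing_by exact Nat.div_lt_self (by omega) (by omega)

def hexCharsL (n : Nat) : List Char :=
  if h : n < 16 then [hexDigL n] else hexCharsL (n / 16) ++ [hexDigL (n % 16)]
decreasing_by exact Nat.div_lt_self (by omega) (by omega)

-- ===== PORT A =====
def coord2dir (z : Int) (x : Int) (y : Int) : List String :=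
  -- the two asserts are Pre_coord2dir
  let m : Int := 64
  let zdiff : Int := 6  -- int(math.floor(math.log(64) / math.log(2))) = 6 exactly
  if z ≤ zdiff then [fmt02d z]
  else
    let mx := PySem.Int.floordiv x m
    let my := PySem.Int.floordiv y m
    let mz := z - zdiff
    let mn := 2 ^ mz.toNat * my + mx     -- mz > 0 in this branch
    let digits := (hexCharsL (4 ^ mz.toNat - 1)).length   -- len('%x' % (4 ** mz - 1))
    let digits := if digits % 2 ≠ 0 then digits + 1 else digits
    -- ('%%0%dX' % digits) % mn : zero-pad the uppercase hex of mn to 'digits' (mn ≥ 0 under Pre_)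
    let hexStr := List.replicate (digits - (hexCharsU mn.toNat).length) '0' ++ hexCharsU mn.toNat
    let dirs := (PySem.List.pyRange 0 (hexStr.length : Int) 2).map
      (fun i => String.mk (PySem.List.slice hexStr (some i) (some (i + 2))))
    fmt02d z :: dirs

-- ===== PORT B =====
-- '%02X' % b for 0 ≤ b < 256
def fmt02X (b : Nat) : String := String.mk [hexDigU (b / 16), hexDigU (b % 16)]

-- the divmod loop of Source B: n, b = divmod(n, 256); parts.append('%02X' % b)
def byteLoop : Nat → Nat → List String → List String
  | 0, _, parts => parts
  | k + 1, n, parts => byteLoop k (n / 256) (parts ++ [fmt02X (n % 256)])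

def coord2dir_alt (z : Int) (x : Int) (y : Int) : List String :=
  if z ≤ 6 then [fmt02d z]
  else
    let mz := z - 6
    let mn := PySem.Int.floordiv y 64 * 2 ^ mz.toNat + PySem.Int.floordiv x 64
    let nbytes := PySem.Int.floordiv (mz + 3) 4
    let parts := byteLoop nbytes.toNat mn.toNat []
    (parts ++ [fmt02d z]).reverse

-- ===== PRECONDITION & SPEC =====
-- Pre_: exactly A's asserts (A raises AssertionError outside them); nothing else is excluded.
def Pre_coord2dir (z : Int) (x : Int) (y : Int) : Prop :=
  0 ≤ z ∧ z ≤ 31 ∧ 0 ≤ x ∧ x < 2 ^ z.toNat ∧ 0 ≤ y ∧ y < 2 ^ z.toNat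
instance (z : Int) (x : Int) (y : Int) : Decidable (Pre_coord2dir z x y) := by
  unfold Pre_coord2dir; infer_instance
def pvWitness_coord2dir : Int × Int × Int := (8, 100, 200)

def Spec_coord2dir (z : Int) (x : Int) (y : Int) (out : List String) : Prop := out = coord2dir_alt z x y
instance (z : Int) (x : Int) (y : Int) (out : List String) : Decidable (Spec_coord2dir z x y out) := by
  unfold Spec_coord2dir; infer_instance

-- ===== CLAIM (what is proved, stated in full; the proofs are below) =====
def Claim_equal_coord2dir : Prop := ∀ (z : Int) (x : Int) (y : Int), Dom_coord2dir z x y → Pre_coord2dir z x y → Spec_coord2dir z x y (coord2dir z x y)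

-- ===== LEMMAS AND PROOFS =====

def padU (n w : Nat) : List Char := List.replicate (w - (hexCharsU n).length) '0' ++ hexCharsU n

theorem hexLen_le (w : Nat) : ∀ n, 1 ≤ w → n < 16 ^ w → (hexCharsU n).length ≤ w := by
  induction w with
  | zero => intro n h; omega
  | succ w ih =>
    intro n _ hn
    rw [hexCharsU]
    split
    · simp
    · rename_i h
      simp only [List.length_append, List.length_cons, List.length_nil]
      have hw1 : 1 ≤ w := by
        rcases Nat.eq_zero_or_pos w with h0 | h1
        · subst h0; simp at hn; omega
        · exact h1
      have hdiv : n / 16 < 16 ^ w := by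
        rw [Nat.div_lt_iff_lt_mul (by norm_num)]
        calc n < 16 ^ (w + 1) := hn
        _ = 16 ^ w * 16 := by rw [pow_succ]
      have := ih (n / 16) hw1 hdiv
      omega

theorem hexLenL_exact (L : Nat) : ∀ n, 16 ^ L ≤ n → n < 16 ^ (L + 1) → (hexCharsL n).length = L + 1 := by
  induction L with
  | zero =>
    intro n h1 h2
    rw [hexCharsL, dif_pos (show n < 16 by simpa using h2)]
    simp
  | succ L ih =>
    intro n h1 h2
    have h16 : ¬ n < 16 := by
      have : (16:Nat) ^ 1 ≤ 16 ^ (L + 1) := Nat.pow_le_pow_right (by norm_num) (by omega)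
      simp only [pow_one] at this
      omega
    rw [hexCharsL, dif_neg h16]
    simp only [List.length_append, List.length_cons, List.length_nil]
    have hlo : 16 ^ L ≤ n / 16 := by
      rw [Nat.le_div_iff_mul_le (by norm_num)]
      calc 16 ^ L * 16 = 16 ^ (L + 1) := by rw [pow_succ]
      _ ≤ n := h1
    have hhi : n / 16 < 16 ^ (L + 1) := by
      rw [Nat.div_lt_iff_lt_mul (by norm_num)]
      calc n < 16 ^ (L + 1 + 1) := h2
      _ = 16 ^ (L + 1) * 16 := by rw [pow_succ]
    rw [ih (n / 16) hlo hhi]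

theorem padU_len (n w : Nat) (h : (hexCharsU n).length ≤ w) : (padU n w).length = w := by
  simp [padU]; omega

theorem padU_step (n w : Nat) (hw : 2 ≤ w) :
    padU n w = padU (n / 16) (w - 1) ++ [hexDigU (n % 16)] := by
  by_cases h : n < 16
  · have e1 : hexCharsU n = [hexDigU n] := by rw [hexCharsU]; exact dif_pos h
    have e0 : n / 16 = 0 := Nat.div_eq_of_lt h
    have e2 : hexCharsU 0 = [hexDigU 0] := by rw [hexCharsU]; norm_num
    have e3 : hexDigU 0 = '0' := by decide
    have e4 : n % 16 = n := Nat.mod_eq_of_lt h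
    unfold padU
    rw [e1, e0, e2, e3, e4]
    simp only [List.length_cons, List.length_nil]
    conv_lhs => rw [show w - 1 = (w - 1 - 1) + 1 by omega]
    rw [List.replicate_succ']
  · have e1 : hexCharsU n = hexCharsU (n / 16) ++ [hexDigU (n % 16)] := by
      rw [hexCharsU]; exact dif_neg h
    unfold padU
    rw [e1]
    simp only [List.length_append, List.length_cons, List.length_nil]
    rw [show w - ((hexCharsU (n / 16)).length + 1) = (w - 1) - (hexCharsU (n / 16)).length by omega]
    simp [List.append_assoc]

theorem padU_two (n : Nat) (h : n < 256) : padU n 2 = [hexDigU (n / 16), hexDigU (n % 16)] := by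
  by_cases h16 : n < 16
  · have e0 : n / 16 = 0 := Nat.div_eq_of_lt h16
    have e4 : n % 16 = n := Nat.mod_eq_of_lt h16
    have e1 : hexCharsU n = [hexDigU n] := by rw [hexCharsU]; exact dif_pos h16
    have e3 : hexDigU 0 = '0' := by decide
    simp [padU, e1, e0, e4, e3, List.replicate]
  · have e1 : hexCharsU n = hexCharsU (n / 16) ++ [hexDigU (n % 16)] := by
      rw [hexCharsU]; exact dif_neg h16
    have h2 : n / 16 < 16 := by omega
    have e2 : hexCharsU (n / 16) = [hexDigU (n / 16)] := by rw [hexCharsU]; exact dif_pos h2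
    simp [padU, e1, e2]

theorem byteLoop_append (k : Nat) : ∀ n p, byteLoop k n p = p ++ byteLoop k n [] := by
  induction k with
  | zero => intro n p; simp [byteLoop]
  | succ k ih =>
    intro n p
    rw [byteLoop, byteLoop]
    rw [ih (n / 256) (p ++ [fmt02X (n % 256)]), ih (n / 256) ([] ++ [fmt02X (n % 256)])]
    simp

theorem bytes_eq (k : Nat) : ∀ n, n < 256 ^ k →
    (List.range k).map (fun j => String.mk (((padU n (2 * k)).drop (2 * j)).take 2))
      = (byteLoop k n []).reverse := by
  induction k with
  | zero => intro n h; simp [byteLoop]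
  | succ k ih =>
    intro n hn
    rcases Nat.eq_zero_or_pos k with hk | hk
    · subst hk
      have h256 : n < 256 := by simpa using hn
      have e : n % 256 = n := Nat.mod_eq_of_lt h256
      rw [padU_two n h256]
      simp [byteLoop, fmt02X, e, List.range_succ]
    · have hsplit : padU n (2 * (k + 1)) =
          padU (n / 256) (2 * k) ++ [hexDigU (n / 16 % 16), hexDigU (n % 16)] := by
        rw [padU_step n (2 * (k + 1)) (by omega)]
        rw [show 2 * (k + 1) - 1 = 2 * k + 1 by omega]
        rw [padU_step (n / 16) (2 * k + 1) (by omega)]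
        rw [show 2 * k + 1 - 1 = 2 * k by omega, Nat.div_div_eq_div_mul]
        norm_num [List.append_assoc]
      have hnk : n / 256 < 256 ^ k := by
        rw [Nat.div_lt_iff_lt_mul (by norm_num)]
        calc n < 256 ^ (k + 1) := hn
        _ = 256 ^ k * 256 := by rw [pow_succ]
      have hnk16 : n / 256 < 16 ^ (2 * k) := by
        rw [show (16:Nat) ^ (2 * k) = 256 ^ k by
          rw [show (256:Nat) = 16 ^ 2 by norm_num, ← pow_mul]]
        exact hnk
      have hlen : (padU (n / 256) (2 * k)).length = 2 * k :=
        padU_len _ _ (hexLen_le (2 * k) (n / 256) (by omega) hnk16)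
      rw [hsplit, List.range_succ, List.map_append]
      have hlast : ∀ c d : Char,
          (((padU (n / 256) (2 * k) ++ [c, d]).drop (2 * k)).take 2) = [c, d] := by
        intro c d
        have hdl : List.drop ((padU (n / 256) (2 * k)).length)
            (padU (n / 256) (2 * k) ++ [c, d]) = [c, d] := List.drop_left
        rw [hlen] at hdl
        rw [hdl]
        simp
      have hfirst : ∀ j ∈ List.range k,
          String.mk (((padU (n / 256) (2 * k) ++ [hexDigU (n / 16 % 16), hexDigU (n % 16)]).drop (2 * j)).take 2)
            = String.mk (((padU (n / 256) (2 * k)).drop (2 * j)).take 2) := by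
        intro j hj
        have hjk : j < k := List.mem_range.mp hj
        rw [List.drop_append_of_le_length (by omega)]
        rw [List.take_append_of_le_length (by rw [List.length_drop]; omega)]
      have hfmt : fmt02X (n % 256) = String.mk [hexDigU (n / 16 % 16), hexDigU (n % 16)] := by
        unfold fmt02X
        rw [show n % 256 / 16 = n / 16 % 16 by omega, show n % 256 % 16 = n % 16 by omega]
      rw [List.map_congr_left hfirst, ih (n / 256) hnk]
      conv_rhs => rw [byteLoop, byteLoop_append k (n / 256) ([] ++ [fmt02X (n % 256)])]
      simp [List.reverse_append, hlast, hfmt]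

theorem sliceForm (l : List Char) (k : Nat) (hl : l.length = 2 * k) :
    (PySem.List.pyRange 0 (l.length : Int) 2).map
        (fun i => String.mk (PySem.List.slice l (some i) (some (i + 2))))
      = (List.range k).map (fun j => String.mk ((l.drop (2 * j)).take 2)) := by
  rw [hl]
  rw [PySem.List.pyRange_of_pos 0 ((2 * k : Nat) : Int) (by norm_num)]
  rcases Nat.eq_zero_or_pos k with h0 | hpos
  · subst h0; simp
  · rw [if_pos (by exact_mod_cast (by omega : 0 < 2 * k))]
    have hc : (((2 * k : Nat) : Int) - 0 + 2 - 1) / 2 = (k : Int) := by omega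
    rw [hc]
    rw [show ((k : Int)).toNat = k from Int.toNat_natCast k]
    rw [List.map_map]
    apply List.map_congr_left
    intro j hj
    simp only [Function.comp_apply, zero_add]
    have hs := PySem.List.slice_natCast_add l (2 * j) 2
    push_cast at hs
    rw [hs]

theorem digitsL_pow (m : Nat) (hm : 1 ≤ m) : (hexCharsL (4 ^ m - 1)).length = (m + 1) / 2 := by
  have h1 : 1 ≤ (m + 1) / 2 := by omega
  have k3 : (4:Nat) ^ m = 2 ^ (2 * m) := by rw [show (4:Nat) = 2 ^ 2 by norm_num, ← pow_mul]
  have k1 : (16:Nat) ^ ((m + 1) / 2 - 1) ≤ 2 ^ (2 * m - 2) := by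
    calc (16:Nat) ^ ((m + 1) / 2 - 1) = 2 ^ (4 * ((m + 1) / 2 - 1)) := by
          rw [show (16:Nat) = 2 ^ 4 by norm_num, ← pow_mul]
    _ ≤ 2 ^ (2 * m - 2) := Nat.pow_le_pow_right (by norm_num) (by omega)
  have k2 : (2:Nat) ^ (2 * m - 2) < 2 ^ (2 * m) := Nat.pow_lt_pow_right (by norm_num) (by omega)
  have k4 : (4:Nat) ^ m ≤ 16 ^ ((m + 1) / 2) := by
    calc (4:Nat) ^ m = 2 ^ (2 * m) := k3
    _ ≤ 2 ^ (4 * ((m + 1) / 2)) := Nat.pow_le_pow_right (by norm_num) (by omega)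
    _ = 16 ^ ((m + 1) / 2) := by rw [show (16:Nat) = 2 ^ 4 by norm_num, ← pow_mul]
  have h4pos : 1 ≤ (4:Nat) ^ m := Nat.one_le_pow _ _ (by norm_num)
  have := hexLenL_exact ((m + 1) / 2 - 1) (4 ^ m - 1) (by omega) (by
    rw [show (m + 1) / 2 - 1 + 1 = (m + 1) / 2 by omega]
    omega)
  omega


-- ===== VERDICT (by name: the statement is the Claim_ definition above) =====
theorem coord2dir_spec : Claim_equal_coord2dir := by
  intro z x y hdom hpre
  unfold Spec_coord2dir coord2dir coord2dir_alt
  obtain ⟨hz0, hz31, hx0, hxd, hy0, hyd⟩ := hpre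
  by_cases hz : z ≤ 6
  · simp [hz]
  · simp only [if_neg hz]
    obtain ⟨a, ha⟩ : ∃ a : Nat, x = (a : Int) := ⟨x.toNat, (Int.toNat_of_nonneg hx0).symm⟩
    obtain ⟨b, hb⟩ : ∃ b : Nat, y = (b : Int) := ⟨y.toNat, (Int.toNat_of_nonneg hy0).symm⟩
    have hm1def : ((z - 6).toNat : Int) = z - 6 := Int.toNat_of_nonneg (by omega)
    set m1 := (z - 6).toNat with hm1
    have hm1pos : 1 ≤ m1 := by omega
    have hzt : z.toNat = m1 + 6 := by omega
    have hfx : PySem.Int.floordiv x 64 = ((a / 64 : Nat) : Int) := by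
      rw [ha]; exact_mod_cast PySem.Int.floordiv_natCast a 64
    have hfy : PySem.Int.floordiv y 64 = ((b / 64 : Nat) : Int) := by
      rw [hb]; exact_mod_cast PySem.Int.floordiv_natCast b 64
    set N : Nat := 2 ^ m1 * (b / 64) + a / 64 with hN
    set k : Nat := (m1 + 3) / 4 with hkdef
    have hkpos : 1 ≤ k := by omega
    have hmnA : 2 ^ m1 * PySem.Int.floordiv y 64 + PySem.Int.floordiv x 64 = (N : Int) := by
      rw [hfx, hfy, hN]; push_cast; ring
    have hmnB : PySem.Int.floordiv y 64 * 2 ^ m1 + PySem.Int.floordiv x 64 = (N : Int) := by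
      rw [hfx, hfy, hN]; push_cast; ring
    have hnb : (PySem.Int.floordiv (z - 6 + 3) 4).toNat = k := by
      rw [PySem.Int.floordiv_eq_ediv_of_pos (by norm_num)]
      omega
    have hab : a < 2 ^ (m1 + 6) := by
      rw [← hzt]
      exact_mod_cast (ha ▸ hxd)
    have hbb : b < 2 ^ (m1 + 6) := by
      rw [← hzt]
      exact_mod_cast (hb ▸ hyd)
    have ha64 : a / 64 < 2 ^ m1 := by
      rw [Nat.div_lt_iff_lt_mul (by norm_num)]
      calc a < 2 ^ (m1 + 6) := hab
      _ = 2 ^ m1 * 64 := by rw [pow_add]; norm_num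
    have hb64 : b / 64 < 2 ^ m1 := by
      rw [Nat.div_lt_iff_lt_mul (by norm_num)]
      calc b < 2 ^ (m1 + 6) := hbb
      _ = 2 ^ m1 * 64 := by rw [pow_add]; norm_num
    have hmnlt : N < 256 ^ k := by
      have h1 : N < 2 ^ m1 * 2 ^ m1 := by
        have hp1 : b / 64 + 1 ≤ 2 ^ m1 := hb64
        have h2 : 2 ^ m1 * (b / 64 + 1) ≤ 2 ^ m1 * 2 ^ m1 := Nat.mul_le_mul_left _ hp1
        rw [Nat.mul_succ] at h2
        omega
      have h2 : 2 ^ m1 * 2 ^ m1 ≤ 256 ^ k := by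
        rw [← pow_add]
        calc (2:Nat) ^ (m1 + m1) ≤ 2 ^ (8 * k) := Nat.pow_le_pow_right (by norm_num) (by omega)
        _ = 256 ^ k := by rw [show (256:Nat) = 2 ^ 8 by norm_num, ← pow_mul]
      omega
    have hmnlt16 : N < 16 ^ (2 * k) := by
      rw [show (16:Nat) ^ (2 * k) = 256 ^ k by
        rw [show (256:Nat) = 16 ^ 2 by norm_num, ← pow_mul]]
      exact hmnlt
    have hd1 : (hexCharsL (4 ^ m1 - 1)).length = (m1 + 1) / 2 := digitsL_pow m1 hm1pos
    have hdig : (if ((m1 + 1) / 2) % 2 ≠ 0 then (m1 + 1) / 2 + 1 else (m1 + 1) / 2) = 2 * k := by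
      split_ifs <;> omega
    have hpadlen : (padU N (2 * k)).length = 2 * k :=
      padU_len _ _ (hexLen_le (2 * k) N (by omega) hmnlt16)
    simp only [hmnA, hmnB, hnb, hd1, hdig, Int.toNat_natCast]
    rw [show List.replicate (2 * k - (hexCharsU N).length) '0' ++ hexCharsU N = padU N (2 * k) from rfl]
    rw [sliceForm (padU N (2 * k)) k hpadlen, bytes_eq k N hmnlt]
    simp [List.reverse_append]
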